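-- pv_equiv track=rewrite | github.com/zulip/zulip-gci | tutorials/tic_tac_toe.py | analyze_options
-- ===== SOURCE A (Python) =====
-- SQUARES = {1, 2, 3, 4, 5, 6, 7, 8, 9}
--
-- TRIPLETS = dict(
--     row1 = {1, 2, 3},
--     row2 = {4, 5, 6},
--     row3 = {7, 8, 9},
--
--     col1 = {1, 4, 7},
--     col2 = {2, 5, 8},
--     col3 = {3, 6, 9},
--
--     diag1 = {1, 5, 9},
--     diag2 = {3, 5, 7},
-- )
--
-- def claimed_squares(moves, player):
--     return {square for p, square in moves
--         if p == player}
--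
-- def open_squares(moves):
--     claimed = {square for _, square in moves}
--     return SQUARES - claimed
--
-- def triplet_status(triplet_name, moves):
--     squares = TRIPLETS[triplet_name]
--     def count(player):
--         return len(claimed_squares(moves, player).intersection(squares))
--
--     return {player: count(player) for player in 'XO'}
--
-- def triplets_represented(moves, player):
--     return {
--         triplet_name
--         for triplet_name in TRIPLETS
--         if triplet_status(triplet_name, moves)[player] > 0
--     }
--
-- def analyze_options(prior_moves, player):
--     def outcome_for_square(square):
--         moves = prior_moves + [(player, square)]
--         return len(triplets_represented(moves, player))
--
--     squares = open_squares(prior_moves)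
--     return {
--         square: outcome_for_square(square)
--         for square in squares
--     }
-- ===== SOURCE B (Python) =====
-- # Bitmask re-implementation: each triplet gets one bit; a precomputed square->mask
-- # table replaces the per-square re-scan of all triplets over all moves; the score of
-- # an open square is the popcount of (the player's covered-triplet mask | that square's mask).
-- TRIPLETS = dict(
--     row1={1, 2, 3}, row2={4, 5, 6}, row3={7, 8, 9},
--     col1={1, 4, 7}, col2={2, 5, 8}, col3={3, 6, 9},
--     diag1={1, 5, 9}, diag2={3, 5, 7},
-- )
--
-- _SQUARE_MASK = {}
-- for _bit, _sqs in enumerate(TRIPLETS.values()):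
--     for _sq in _sqs:
--         _SQUARE_MASK[_sq] = _SQUARE_MASK.get(_sq, 0) | (1 << _bit)
--
--
-- def analyze_options(prior_moves, player):
--     claimed = {sq for _, sq in prior_moves}
--     masks = {"X": 0, "O": 0}
--     for p, sq in prior_moves:
--         if p in masks:
--             masks[p] |= _SQUARE_MASK.get(sq, 0)
--     return {
--         sq: bin(masks[player] | _SQUARE_MASK[sq]).count("1")
--         for sq in sorted({1, 2, 3, 4, 5, 6, 7, 8, 9} - claimed)
--     }
-- ===== Notes on version B (the rewrite author's own statement) =====
-- stated objective: alternative
-- what changed: Replaces the per-open-square rebuild of the move list and re-scan of every triplet's status for both players by a precomputed square->triplet bitmask table: the player's covered mask is accumulated once from prior_moves and each open square's score is popcount(base | mask[square]).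
import Mathlib
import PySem

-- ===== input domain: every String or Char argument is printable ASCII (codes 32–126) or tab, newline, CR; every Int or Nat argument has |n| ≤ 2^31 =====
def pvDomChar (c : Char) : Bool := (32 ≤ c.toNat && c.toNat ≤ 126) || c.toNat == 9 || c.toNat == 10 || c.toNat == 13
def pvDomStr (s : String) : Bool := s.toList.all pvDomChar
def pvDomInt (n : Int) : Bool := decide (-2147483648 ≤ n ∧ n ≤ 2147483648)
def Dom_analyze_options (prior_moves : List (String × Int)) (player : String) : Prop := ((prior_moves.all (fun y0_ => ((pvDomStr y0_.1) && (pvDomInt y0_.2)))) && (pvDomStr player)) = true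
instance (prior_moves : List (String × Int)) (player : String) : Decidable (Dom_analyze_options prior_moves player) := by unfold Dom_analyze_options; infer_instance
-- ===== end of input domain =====

-- B replaces A's per-open-square re-scan of every triplet's status by a precomputed
-- square -> triplet-bitmask table: the score of an open square is popcount(base | mask[square]).


-- ===== PORT A =====
-- SQUARES = {1, …, 9}
def pvSQUARES : PySem.Set Int := PySem.Set.ofList [1, 2, 3, 4, 5, 6, 7, 8, 9]

-- TRIPLETS = dict(row1={1,2,3}, …) : the triplet sets keyed by name, in insertion order
def pvTRIPLETS : PySem.Dict String (PySem.Set Int) := PySem.Dict.mk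
  [("row1", [1, 2, 3]), ("row2", [4, 5, 6]), ("row3", [7, 8, 9]),
   ("col1", [1, 4, 7]), ("col2", [2, 5, 8]), ("col3", [3, 6, 9]),
   ("diag1", [1, 5, 9]), ("diag2", [3, 5, 7])]

def claimed_squares (moves : List (String × Int)) (player : String) : PySem.Set Int :=
  PySem.Set.ofList ((moves.filter (fun m => m.1 == player)).map (·.2))

def open_squares (moves : List (String × Int)) : PySem.Set Int :=
  PySem.Set.diff pvSQUARES (PySem.Set.ofList (moves.map (·.2)))

-- TRIPLETS[triplet_name] cannot raise (all callers pass keys of TRIPLETS), so getD is exact here.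
def triplet_status (triplet_name : String) (moves : List (String × Int)) : PySem.Dict String Int :=
  let squares := pvTRIPLETS.getD triplet_name []
  (["X", "O"].foldl (fun d p =>
      d.insert p (PySem.Set.len (PySem.Set.inter (claimed_squares moves p) squares)))
    PySem.Dict.empty)

-- triplet_status(…)[player] raises KeyError when player ∉ {"X","O"}; exactly those inputs are
-- outside Pre_analyze_options (unless no square is open, in which case this code is unreached),
-- so the getD default is never the value used on admitted inputs.
def triplets_represented (moves : List (String × Int)) (player : String) : PySem.Set String :=
  PySem.Set.ofList ((pvTRIPLETS.keys).filter
    (fun triplet_name => (triplet_status triplet_name moves).getD player 0 > 0))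

def analyze_options (prior_moves : List (String × Int)) (player : String) : List (Int × Int) :=
  let outcome_for_square : Int → Int := fun square =>
    let moves := prior_moves ++ [(player, square)]
    PySem.Set.len (triplets_represented moves player)
  let squares := open_squares prior_moves
  squares.map (fun square => (square, outcome_for_square square))

-- ===== PORT B =====
-- module-level: _SQUARE_MASK built by the double loop over enumerate(TRIPLETS.values())
def pvTRIPLETS_B : List (String × List Int) :=
  [("row1", [1, 2, 3]), ("row2", [4, 5, 6]), ("row3", [7, 8, 9]),
   ("col1", [1, 4, 7]), ("col2", [2, 5, 8]), ("col3", [3, 6, 9]),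
   ("diag1", [1, 5, 9]), ("diag2", [3, 5, 7])]

def pvSquareMask : PySem.Dict Int Int :=
  (PySem.List.enumerate (pvTRIPLETS_B.map (·.2))).foldl
    (fun d bs => bs.2.foldl
      (fun d sq => d.insert sq (PySem.Int.bor (d.getD sq 0) ((1 : Int) <<< bs.1.toNat))) d)
    PySem.Dict.empty

def analyze_options_alt (prior_moves : List (String × Int)) (player : String) : List (Int × Int) :=
  let claimed : PySem.Set Int := PySem.Set.ofList (prior_moves.map (·.2))
  let masks : PySem.Dict String Int := prior_moves.foldl
    (fun d m => if d.contains m.1 then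
        d.insert m.1 (PySem.Int.bor (d.getD m.1 0) (pvSquareMask.getD m.2 0))
      else d)
    (PySem.Dict.mk [("X", 0), ("O", 0)])
  -- masks[player] raises KeyError when player ∉ {"X","O"} (and a square is open, so the
  -- comprehension body runs); exactly those inputs are outside Pre_analyze_options, so the
  -- getD default is never the value used on admitted inputs.
  -- bin(cov).count("1") = PySem.Int.bitCount cov (cov ≥ 0 here)
  (PySem.List.sorted
      (PySem.Set.diff (PySem.Set.ofList [1, 2, 3, 4, 5, 6, 7, 8, 9]) claimed)
      (fun x => x) false).map
    (fun sq => (sq, (PySem.Int.bitCount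
      (PySem.Int.bor (masks.getD player 0) (pvSquareMask.getD sq 0)) : Int)))

-- ===== PRECONDITION & SPEC =====
-- Pre_ excludes exactly the inputs on which A raises KeyError: player other than "X"/"O"
-- while at least one of the squares 1..9 is unclaimed (triplet_status has only keys "X","O").
def Pre_analyze_options (prior_moves : List (String × Int)) (player : String) : Prop :=
  player = "X" ∨ player = "O" ∨
    ∀ i ∈ ([1, 2, 3, 4, 5, 6, 7, 8, 9] : List Int), ∃ m ∈ prior_moves, m.2 = i

instance (prior_moves : List (String × Int)) (player : String) : Decidable (Pre_analyze_options prior_moves player) := by unfold Pre_analyze_options; infer_instance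

def pvWitness_analyze_options : (List (String × Int)) × String := ([("X", 1), ("O", 5)], "X")

def Spec_analyze_options (prior_moves : List (String × Int)) (player : String) (out : List (Int × Int)) : Prop := out = analyze_options_alt prior_moves player
instance (prior_moves : List (String × Int)) (player : String) (out : List (Int × Int)) : Decidable (Spec_analyze_options prior_moves player out) := by unfold Spec_analyze_options; infer_instance

-- ===== CLAIM (what is proved, stated in full; the proofs are below) =====
def Claim_equal_analyze_options : Prop := ∀ (prior_moves : List (String × Int)) (player : String), Dom_analyze_options prior_moves player → Pre_analyze_options prior_moves player → Spec_analyze_options prior_moves player (analyze_options prior_moves player)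


-- ===== LEMMAS AND PROOFS =====

-- natural-number mirror of _SQUARE_MASK as a total function
def pvNatMask (s : Int) : Nat :=
  if s = 1 then 73 else if s = 2 then 17 else if s = 3 then 161 else if s = 4 then 10
  else if s = 5 then 210 else if s = 6 then 34 else if s = 7 then 140 else if s = 8 then 20
  else if s = 9 then 100 else 0

-- the OR of the masks of the squares selected by c (only c 1 .. c 9 matter)
def pvBigOr (c : Int → Bool) : Nat :=
  ([1, 2, 3, 4, 5, 6, 7, 8, 9] : List Int).foldr
    (fun i acc => (if c i then pvNatMask i else 0) ||| acc) 0

-- a bit-vector of nine booleans as a selection function on squares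
def pvCof (c1 c2 c3 c4 c5 c6 c7 c8 c9 : Bool) : Int → Bool := fun s =>
  if s = 1 then c1 else if s = 2 then c2 else if s = 3 then c3 else if s = 4 then c4
  else if s = 5 then c5 else if s = 6 then c6 else if s = 7 then c7 else if s = 8 then c8
  else if s = 9 then c9 else false

lemma pvAny_congr (l : List Int) (c c' : Int → Bool) (h : ∀ s ∈ l, c s = c' s) :
    l.any c = l.any c' := by
  rw [Bool.eq_iff_iff]
  simp only [List.any_eq_true]
  constructor <;> rintro ⟨s, hs, hcs⟩ <;> refine ⟨s, hs, ?_⟩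
  · rw [← h s hs]; exact hcs
  · rw [h s hs]; exact hcs

set_option maxHeartbeats 1600000 in
lemma pvSquareMask_eval : pvSquareMask = PySem.Dict.mk
    [(1, 73), (2, 17), (3, 161), (4, 10), (5, 210), (6, 34), (7, 140), (8, 20), (9, 100)] := by
  rfl

lemma pvMask_getD (s : Int) : pvSquareMask.getD s 0 = ((pvNatMask s : Nat) : Int) := by
  rw [pvSquareMask_eval]
  unfold pvNatMask
  split_ifs with h1 h2 h3 h4 h5 h6 h7 h8 h9
  · subst h1; decide
  · subst h2; decide
  · subst h3; decide
  · subst h4; decide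
  · subst h5; decide
  · subst h6; decide
  · subst h7; decide
  · subst h8; decide
  · subst h9; decide
  · simp only [PySem.Dict.getD, PySem.Dict.get?_mk_cons, beq_iff_eq]
    rw [if_neg (by omega), if_neg (by omega), if_neg (by omega), if_neg (by omega),
      if_neg (by omega), if_neg (by omega), if_neg (by omega), if_neg (by omega),
      if_neg (by omega)]
    rfl

lemma pvSQUARES_list : pvSQUARES = ([1, 2, 3, 4, 5, 6, 7, 8, 9] : List Int) := by decide

lemma pvMem_claimed (moves : List (String × Int)) (player : String) (s : Int) :
    s ∈ (claimed_squares moves player : List Int) ↔ (player, s) ∈ moves := by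
  simp only [claimed_squares, PySem.Set.mem_ofList, List.mem_map, List.mem_filter, beq_iff_eq]
  constructor
  · rintro ⟨⟨p, q⟩, ⟨hm, rfl⟩, rfl⟩; exact hm
  · intro h; exact ⟨(player, s), ⟨h, rfl⟩, rfl⟩

lemma pvLen_inter_pos (c t : PySem.Set Int) :
    (0 < PySem.Set.len (PySem.Set.inter c t)) ↔ ∃ s ∈ (t : List Int), s ∈ (c : List Int) := by
  simp only [PySem.Set.len, PySem.Set.inter, Int.natCast_pos, List.length_pos_iff,
    ne_eq, List.filter_eq_nil_iff, not_forall]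
  constructor
  · rintro ⟨x, hx, hpx⟩
    exact ⟨x, by simpa [PySem.Set.contains_iff] using (of_not_not hpx), hx⟩
  · rintro ⟨s, hst, hsc⟩
    refine ⟨s, hsc, ?_⟩
    simp [hst]

lemma pvStatus_pos (name : String) (moves : List (String × Int)) (player : String)
    (hp : player = "X" ∨ player = "O") :
    (0 < (triplet_status name moves).getD player 0) ↔
      ∃ s ∈ (pvTRIPLETS.getD name [] : List Int), (player, s) ∈ moves := by
  rcases hp with rfl | rfl
  · simp only [triplet_status, List.foldl_cons, List.foldl_nil]
    rw [PySem.Dict.getD_insert, if_neg (by decide), PySem.Dict.getD_insert, if_pos rfl,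
      pvLen_inter_pos]
    constructor <;> rintro ⟨s, hst, hsc⟩ <;>
      exact ⟨s, hst, by
        first
          | exact (pvMem_claimed _ _ _).1 hsc
          | exact (pvMem_claimed _ _ _).2 hsc⟩
  · simp only [triplet_status, List.foldl_cons, List.foldl_nil]
    rw [PySem.Dict.getD_insert, if_pos rfl, pvLen_inter_pos]
    constructor <;> rintro ⟨s, hst, hsc⟩ <;>
      exact ⟨s, hst, by
        first
          | exact (pvMem_claimed _ _ _).1 hsc
          | exact (pvMem_claimed _ _ _).2 hsc⟩

-- A's per-square score is the number of triplets meeting the player's claimed squares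
lemma pvAval (moves : List (String × Int)) (player : String)
    (hp : player = "X" ∨ player = "O") :
    PySem.Set.len (triplets_represented moves player) =
      ((pvTRIPLETS_B.filter
          (fun t => t.2.any (fun s => decide ((player, s) ∈ moves)))).length : Int) := by
  unfold triplets_represented
  have hcongr : (pvTRIPLETS.keys).filter
        (fun name => decide ((triplet_status name moves).getD player 0 > 0)) =
      (pvTRIPLETS.keys).filter
        (fun name => decide (∃ s ∈ (pvTRIPLETS.getD name [] : List Int), (player, s) ∈ moves)) := by
    apply List.filter_congr
    intro name _
    simp only [decide_eq_decide, gt_iff_lt]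
    exact pvStatus_pos name moves player hp
  rw [hcongr]
  have hnodup : ((pvTRIPLETS.keys).filter
      (fun name => decide (∃ s ∈ (pvTRIPLETS.getD name [] : List Int), (player, s) ∈ moves))).Nodup :=
    (by decide : (pvTRIPLETS.keys).Nodup).filter _
  simp only [PySem.Set.len]
  rw [PySem.Set.ofList_eq_self_of_nodup _ hnodup]
  have hkeys : pvTRIPLETS.keys = pvTRIPLETS_B.map (·.1) := by decide
  rw [hkeys, List.filter_map, List.length_map]
  congr 1
  congr 1
  apply List.filter_congr
  intro t ht
  rw [Bool.eq_iff_iff]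
  simp only [Function.comp_apply, List.any_eq_true, decide_eq_true_eq]
  fin_cases ht <;> simp [pvTRIPLETS, PySem.Dict.getD, PySem.Dict.get?]

-- B's accumulation loop, mirrored on Nat
lemma pvFold_eq (player : String) (l : List (String × Int)) (b : Nat) :
    l.foldl (fun b m => if m.1 == player then PySem.Int.bor b (pvSquareMask.getD m.2 0) else b)
        ((b : Nat) : Int)
      = ((l.foldl (fun b m => if m.1 = player then b ||| pvNatMask m.2 else b) b : Nat) : Int) := by
  induction l generalizing b with
  | nil => rfl
  | cons m l ih =>
    simp only [List.foldl_cons]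
    by_cases h : m.1 = player
    · rw [if_pos (by simp [h]), if_pos h, pvMask_getD, PySem.Int.bor_natCast]; exact ih _
    · rw [if_neg (by simp [h]), if_neg h]; exact ih b

lemma pvFold_eq0 (player : String) (l : List (String × Int)) :
    l.foldl (fun b m => if m.1 == player then PySem.Int.bor b (pvSquareMask.getD m.2 0) else b)
        (0 : Int)
      = ((l.foldl (fun b m => if m.1 = player then b ||| pvNatMask m.2 else b) 0 : Nat) : Int) := by
  simpa using pvFold_eq player l 0

lemma pvMasks_fold (l : List (String × Int)) (bx bo : Int) :
    l.foldl (fun d m => if d.contains m.1 then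
        d.insert m.1 (PySem.Int.bor (d.getD m.1 0) (pvSquareMask.getD m.2 0))
      else d) (PySem.Dict.mk [("X", bx), ("O", bo)])
      = PySem.Dict.mk
          [("X", l.foldl
              (fun b m => if m.1 == "X" then PySem.Int.bor b (pvSquareMask.getD m.2 0) else b) bx),
           ("O", l.foldl
              (fun b m => if m.1 == "O" then PySem.Int.bor b (pvSquareMask.getD m.2 0) else b) bo)] := by
  induction l generalizing bx bo with
  | nil => rfl
  | cons m l ih =>
    simp only [List.foldl_cons]
    by_cases hx : m.1 = "X"
    · rw [hx, if_pos (by simp [PySem.Dict.contains]),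
        show (PySem.Dict.mk [("X", bx), ("O", bo)]).getD "X" 0 = bx by
          simp [PySem.Dict.getD, PySem.Dict.get?],
        show (PySem.Dict.mk [("X", bx), ("O", bo)]).insert "X"
              (PySem.Int.bor bx (pvSquareMask.getD m.2 0))
            = PySem.Dict.mk [("X", PySem.Int.bor bx (pvSquareMask.getD m.2 0)), ("O", bo)] by
          simp [PySem.Dict.insert, PySem.Dict.contains],
        ih]
      simp
    · by_cases ho : m.1 = "O"
      · rw [ho, if_pos (by simp [PySem.Dict.contains]),
          show (PySem.Dict.mk [("X", bx), ("O", bo)]).getD "O" 0 = bo by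
            simp [PySem.Dict.getD, PySem.Dict.get?],
          show (PySem.Dict.mk [("X", bx), ("O", bo)]).insert "O"
                (PySem.Int.bor bo (pvSquareMask.getD m.2 0))
              = PySem.Dict.mk [("X", bx), ("O", PySem.Int.bor bo (pvSquareMask.getD m.2 0))] by
            simp [PySem.Dict.insert, PySem.Dict.contains],
          ih]
        simp
      · rw [if_neg (by
          simp only [PySem.Dict.contains, List.any_cons, List.any_nil, Bool.or_false,
            Bool.or_eq_true, beq_iff_eq]
          rintro (h | h)
          exacts [hx h.symm, ho h.symm]), ih]
        simp [hx, ho]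

lemma pvBase_eval (l : List (String × Int)) (player : String)
    (hp : player = "X" ∨ player = "O") :
    ((l.foldl (fun d m => if d.contains m.1 then
        d.insert m.1 (PySem.Int.bor (d.getD m.1 0) (pvSquareMask.getD m.2 0))
      else d) (PySem.Dict.mk [("X", 0), ("O", 0)])).getD player 0)
      = l.foldl
          (fun b m => if m.1 == player then PySem.Int.bor b (pvSquareMask.getD m.2 0) else b) 0 := by
  rw [pvMasks_fold]
  rcases hp with rfl | rfl
  · simp [PySem.Dict.getD, PySem.Dict.get?]
  · simp [PySem.Dict.getD, PySem.Dict.get?]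

lemma pvTestBit_fold (player : String) (l : List (String × Int)) (b : Nat) (t : Nat) :
    (l.foldl (fun b m => if m.1 = player then b ||| pvNatMask m.2 else b) b).testBit t
      = (b.testBit t || l.any (fun m => decide (m.1 = player) && (pvNatMask m.2).testBit t)) := by
  induction l generalizing b with
  | nil => simp
  | cons m l ih =>
    simp only [List.foldl_cons, List.any_cons]
    by_cases h : m.1 = player
    · simp [h, ih, Nat.testBit_or, Bool.or_assoc]
    · simp [h, ih]

lemma pvNatMask_cases (s : Int) (t : Nat) (h : (pvNatMask s).testBit t = true) :
    s ∈ ([1, 2, 3, 4, 5, 6, 7, 8, 9] : List Int) := by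
  unfold pvNatMask at h
  split_ifs at h with h1 h2 h3 h4 h5 h6 h7 h8 h9 <;>
    simp_all [Nat.zero_testBit]

lemma pvTestBit_orFoldr (li : List Int) (c : Int → Bool) (t : Nat) :
    ((li.foldr (fun i acc => (if c i then pvNatMask i else 0) ||| acc) 0).testBit t = true) ↔
      ∃ i ∈ li, c i = true ∧ (pvNatMask i).testBit t = true := by
  induction li with
  | nil => simp [Nat.zero_testBit]
  | cons a li ih =>
    simp only [List.foldr_cons, Nat.testBit_or, Bool.or_eq_true, ih, List.mem_cons]
    by_cases h : c a = true
    · simp only [h, if_true]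
      constructor
      · rintro (ht | ⟨i, hi, hc, ht⟩)
        · exact ⟨a, Or.inl rfl, h, ht⟩
        · exact ⟨i, Or.inr hi, hc, ht⟩
      · rintro ⟨i, rfl | hi, hc, ht⟩
        · exact Or.inl ht
        · exact Or.inr ⟨i, hi, hc, ht⟩
    · simp only [h, if_false, Nat.zero_testBit, Bool.false_eq_true, false_or]
      constructor
      · rintro ⟨i, hi, hc, ht⟩
        exact ⟨i, Or.inr hi, hc, ht⟩
      · rintro ⟨i, rfl | hi, hc, ht⟩
        · exact absurd hc h
        · exact ⟨i, hi, hc, ht⟩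

lemma pvTestBit_bigOr (c : Int → Bool) (t : Nat) :
    (pvBigOr c).testBit t = true ↔
      ∃ i ∈ ([1, 2, 3, 4, 5, 6, 7, 8, 9] : List Int), c i = true ∧ (pvNatMask i).testBit t = true :=
  pvTestBit_orFoldr _ c t

-- the whole covered-mask of B collapses to the OR over the selected squares
lemma pvCollapse (player : String) (l : List (String × Int)) (sq : Int) :
    (l.foldl (fun b m => if m.1 = player then b ||| pvNatMask m.2 else b) 0) ||| pvNatMask sq
      = pvBigOr (fun i => decide ((player, i) ∈ l ∨ i = sq)) := by
  apply Nat.eq_of_testBit_eq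
  intro t
  rw [Nat.testBit_or, pvTestBit_fold, Nat.zero_testBit, Bool.false_or]
  rw [Bool.eq_iff_iff, Bool.or_eq_true, List.any_eq_true, pvTestBit_bigOr]
  simp only [Bool.and_eq_true, decide_eq_true_eq]
  constructor
  · rintro (⟨⟨p, s⟩, hm, rfl, ht⟩ | ht)
    · exact ⟨s, pvNatMask_cases s t ht, Or.inl hm, ht⟩
    · exact ⟨sq, pvNatMask_cases sq t ht, Or.inr rfl, ht⟩
  · rintro ⟨i, _, hm | rfl, ht⟩
    · exact Or.inl ⟨(player, i), hm, rfl, ht⟩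
    · exact Or.inr ht

-- the 512-case kernel computation: triplet count = popcount of the OR of masks
lemma pvCount_popcount : ∀ c1 c2 c3 c4 c5 c6 c7 c8 c9 : Bool,
    ((pvTRIPLETS_B.filter
        (fun t => t.2.any (pvCof c1 c2 c3 c4 c5 c6 c7 c8 c9))).length : Int)
      = (PySem.Int.bitCount ((pvBigOr (pvCof c1 c2 c3 c4 c5 c6 c7 c8 c9) : Nat) : Int) : Int) := by
  decide

lemma pvBigOr_congr (c c' : Int → Bool)
    (h : ∀ i ∈ ([1, 2, 3, 4, 5, 6, 7, 8, 9] : List Int), c i = c' i) :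
    pvBigOr c = pvBigOr c' := by
  simp only [pvBigOr, List.foldr_cons, List.foldr_nil]
  rw [h 1 (by simp), h 2 (by simp), h 3 (by simp), h 4 (by simp), h 5 (by simp),
    h 6 (by simp), h 7 (by simp), h 8 (by simp), h 9 (by simp)]

lemma pvFilter_congr_c (c c' : Int → Bool)
    (h : ∀ i ∈ ([1, 2, 3, 4, 5, 6, 7, 8, 9] : List Int), c i = c' i) :
    pvTRIPLETS_B.filter (fun t => t.2.any c) = pvTRIPLETS_B.filter (fun t => t.2.any c') := by
  have hsub : ∀ t ∈ pvTRIPLETS_B, ∀ s ∈ t.2, s ∈ ([1, 2, 3, 4, 5, 6, 7, 8, 9] : List Int) := by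
    decide
  apply List.filter_congr
  intro t ht
  exact pvAny_congr _ _ _ (fun s hs => h s (hsub t ht s hs))

-- the two open-square lists coincide (B sorts an already-ascending list)
lemma pvOpens_eq (claimed : PySem.Set Int) :
    PySem.List.sorted (PySem.Set.diff (PySem.Set.ofList [1, 2, 3, 4, 5, 6, 7, 8, 9]) claimed)
        (fun x => x) false
      = PySem.Set.diff pvSQUARES claimed := by
  apply PySem.List.sorted_eq_self_of_pairwise
  have hp : (PySem.Set.ofList [1, 2, 3, 4, 5, 6, 7, 8, 9] : List Int).Pairwise (· ≤ ·) := by decide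
  exact hp.filter _

-- the per-square value equality, for player "X" or "O"
lemma pvVal_eq (prior_moves : List (String × Int)) (player : String) (sq : Int)
    (hp : player = "X" ∨ player = "O") :
    PySem.Set.len (triplets_represented (prior_moves ++ [(player, sq)]) player)
      = (PySem.Int.bitCount
          (PySem.Int.bor
            (prior_moves.foldl
              (fun b m => if m.1 == player then PySem.Int.bor b (pvSquareMask.getD m.2 0) else b) 0)
            (pvSquareMask.getD sq 0)) : Int) := by
  set c : Int → Bool := fun i => decide ((player, i) ∈ prior_moves ∨ i = sq) with hc
  rw [pvAval _ _ hp]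
  have h1 : pvTRIPLETS_B.filter
        (fun t => t.2.any (fun s => decide ((player, s) ∈ prior_moves ++ [(player, sq)])))
      = pvTRIPLETS_B.filter (fun t => t.2.any c) := by
    apply List.filter_congr
    intro t _
    refine pvAny_congr _ _ _ (fun s _ => ?_)
    simp [hc, Prod.ext_iff]
  rw [h1, pvFold_eq0, pvMask_getD, PySem.Int.bor_natCast, pvCollapse]
  have hcc : ∀ i ∈ ([1, 2, 3, 4, 5, 6, 7, 8, 9] : List Int),
      pvCof (c 1) (c 2) (c 3) (c 4) (c 5) (c 6) (c 7) (c 8) (c 9) i = c i := by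
    intro i hi
    fin_cases hi <;> simp [pvCof]
  rw [pvFilter_congr_c c _ (fun i hi => (hcc i hi).symm),
    pvBigOr_congr c _ (fun i hi => (hcc i hi).symm)]
  exact pvCount_popcount (c 1) (c 2) (c 3) (c 4) (c 5) (c 6) (c 7) (c 8) (c 9)

-- ===== VERDICT (by name: the statement is the Claim_ definition above) =====
theorem analyze_options_spec : Claim_equal_analyze_options := by
  intro prior_moves player _ hpre
  unfold Spec_analyze_options analyze_options analyze_options_alt
  dsimp only
  rw [pvOpens_eq]
  have hbase : (player = "X" ∨ player = "O") → ∀ sq : Int,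
      (PySem.Int.bitCount (PySem.Int.bor
        ((prior_moves.foldl (fun d m => if d.contains m.1 then
            d.insert m.1 (PySem.Int.bor (d.getD m.1 0) (pvSquareMask.getD m.2 0))
          else d) (PySem.Dict.mk [("X", 0), ("O", 0)])).getD player 0)
        (pvSquareMask.getD sq 0)) : Int)
      = (PySem.Int.bitCount (PySem.Int.bor
          (prior_moves.foldl (fun b m =>
            if m.1 == player then PySem.Int.bor b (pvSquareMask.getD m.2 0) else b) 0)
          (pvSquareMask.getD sq 0)) : Int) := fun hp sq => by
    rw [pvBase_eval prior_moves player hp]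
  have hval : (player = "X" ∨ player = "O") →
      (PySem.Set.diff pvSQUARES (PySem.Set.ofList (prior_moves.map (·.2))) : List Int).map
          (fun square => (square, PySem.Set.len
            (triplets_represented (prior_moves ++ [(player, square)]) player)))
        = (PySem.Set.diff pvSQUARES (PySem.Set.ofList (prior_moves.map (·.2))) : List Int).map
          (fun sq => (sq, (PySem.Int.bitCount (PySem.Int.bor
              (prior_moves.foldl (fun b m =>
                if m.1 == player then PySem.Int.bor b (pvSquareMask.getD m.2 0) else b) 0)
              (pvSquareMask.getD sq 0)) : Int))) := by
    intro hp
    apply List.map_congr_left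
    intro sq _
    exact congrArg (Prod.mk sq) (pvVal_eq prior_moves player sq hp)
  have hmap : (player = "X" ∨ player = "O") →
      (PySem.Set.diff pvSQUARES (PySem.Set.ofList (prior_moves.map (·.2))) : List Int).map
          (fun sq => (sq, (PySem.Int.bitCount (PySem.Int.bor
              ((prior_moves.foldl (fun d m => if d.contains m.1 then
                  d.insert m.1 (PySem.Int.bor (d.getD m.1 0) (pvSquareMask.getD m.2 0))
                else d) (PySem.Dict.mk [("X", 0), ("O", 0)])).getD player 0)
              (pvSquareMask.getD sq 0)) : Int)))
        = (PySem.Set.diff pvSQUARES (PySem.Set.ofList (prior_moves.map (·.2))) : List Int).map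
          (fun sq => (sq, (PySem.Int.bitCount (PySem.Int.bor
              (prior_moves.foldl (fun b m =>
                if m.1 == player then PySem.Int.bor b (pvSquareMask.getD m.2 0) else b) 0)
              (pvSquareMask.getD sq 0)) : Int))) := fun hp => by
    apply List.map_congr_left
    intro sq _
    exact congrArg (Prod.mk sq) (hbase hp sq)
  rcases hpre with hp | hp | hfull
  · exact (hval (Or.inl hp)).trans (hmap (Or.inl hp)).symm
  · exact (hval (Or.inr hp)).trans (hmap (Or.inr hp)).symm
  · have hnil : (PySem.Set.diff pvSQUARES (PySem.Set.ofList (prior_moves.map (·.2))) : List Int)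
        = [] := by
      rw [List.eq_nil_iff_forall_not_mem]
      intro x hx
      rw [PySem.Set.mem_diff] at hx
      rcases hx with ⟨hx9, hxnc⟩
      rw [pvSQUARES_list] at hx9
      rcases hfull x hx9 with ⟨m, hm, hmx⟩
      apply hxnc
      simp only [PySem.Set.mem_ofList, List.mem_map]
      exact ⟨m, hm, hmx⟩
    have hnil' : open_squares prior_moves = [] := hnil
    rw [hnil', hnil]
    rfl
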